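-- pv_equiv track=rewrite | github.com/bpatenko/heiDPI_benchmark | utility/detected_dropped_events.py | find_missing_ids
-- ===== SOURCE A (Python) =====
-- from typing import List, Optional, Tuple
--
-- def find_missing_ids(sorted_ids: List[int]) -> Tuple[int, List[str]]:
--     """Ermittelt die Anzahl und Bereiche der fehlenden IDs.
--
--     ``sorted_ids`` sollte eine sortierte Liste von IDs sein. Die Funktion
--     gibt die Anzahl der fehlenden IDs sowie eine Liste von Zeichenketten
--     zurück, die entweder Einzelwerte oder Bereiche in der Form
--     "a-b" darstellen.
--     """
--     missing_count = 0
--     missing_ranges: List[str] = []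
--     if not sorted_ids:
--         return missing_count, missing_ranges
--     # Sortiere sicherheitshalber
--     sorted_ids.sort()
--     last = sorted_ids[0]
--     for current in sorted_ids[1:]:
--         diff = current - last
--         if diff > 1:
--             # Es fehlen (diff-1) IDs zwischen last und current
--             missing_count += diff - 1
--             if diff == 2:
--                 # Genau eine fehlende ID
--                 missing_ranges.append(str(last + 1))
--             else:
--                 # Bereich fehlender IDs
--                 missing_ranges.append(f"{last + 1}-{current - 1}")
--         last = current
--     return missing_count, missing_ranges
-- ===== SOURCE B (Python) =====
-- from typing import List, Tuple
--
-- def find_missing_ids(sorted_ids: List[int]) -> Tuple[int, List[str]]: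
--     if not sorted_ids:
--         return 0, []
--     sorted_ids.sort()
--     # distinct present ids, ascending
--     d = sorted(set(sorted_ids))
--     # group the present ids into maximal consecutive runs: inside a run,
--     # value - position is constant, and it strictly grows from run to run,
--     # so keying a dict by it collects (first, last) of every run in order.
--     runs = {}
--     for i, v in enumerate(d):
--         k = v - i
--         if k in runs:
--             runs[k] = (runs[k][0], v)
--         else:
--             runs[k] = (v, v)
--     bounds = list(runs.values())
--     # the missing ranges are the complements between consecutive runs
--     ranges: List[str] = []
--     for (_, e1), (s2, _) in zip(bounds, bounds[1:]):
--         lo, hi = e1 + 1, s2 - 1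
--         ranges.append(str(lo) if lo == hi else f"{lo}-{hi}")
--     # count in closed form: span minus number of present distinct ids
--     count = (d[-1] - d[0] + 1) - len(d)
--     return count, ranges
-- ===== Notes on version B (the rewrite author's own statement) =====
-- stated objective: alternative
-- what changed: Instead of A's single accumulator scan over adjacent elements, B dedupes the ids with a set, groups the present ids into maximal consecutive runs via a dict keyed by value-minus-index, emits the missing ranges as the complements between consecutive runs, and computes the count by the closed form (max - min + 1) - number of distinct ids.
import Mathlib
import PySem

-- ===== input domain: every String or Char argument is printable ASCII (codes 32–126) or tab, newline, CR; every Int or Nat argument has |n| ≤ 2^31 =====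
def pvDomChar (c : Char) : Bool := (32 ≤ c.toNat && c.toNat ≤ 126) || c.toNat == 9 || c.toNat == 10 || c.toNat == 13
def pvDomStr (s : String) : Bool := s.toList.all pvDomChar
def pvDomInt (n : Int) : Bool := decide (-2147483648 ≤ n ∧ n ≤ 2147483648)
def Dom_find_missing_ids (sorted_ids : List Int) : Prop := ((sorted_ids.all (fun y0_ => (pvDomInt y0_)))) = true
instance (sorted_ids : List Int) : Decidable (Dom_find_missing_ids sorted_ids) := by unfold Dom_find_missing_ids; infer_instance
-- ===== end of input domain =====

-- B replaces A's accumulator scan by: set-dedup, runs grouped via a dict keyed by value-minus-index,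
-- ranges as complements between runs, count in closed form; objective: alternative.
-- Both Pythons sort the argument in place (same observable mutation); equivalence here is about the return value.


-- ===== PORT A =====
-- loop state: (last, missing_count, missing_ranges)
def fmiStep (st : Int × Int × List String) (current : Int) : Int × Int × List String :=
  let last := st.1
  let diff := current - last
  if diff > 1 then
    if diff = 2 then
      (current, st.2.1 + (diff - 1), st.2.2 ++ [PySem.Int.toStr (last + 1)])
    else
      (current, st.2.1 + (diff - 1),
        st.2.2 ++ [PySem.Int.toStr (last + 1) ++ "-" ++ PySem.Int.toStr (current - 1)])
  else
    (current, st.2.1, st.2.2)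

def find_missing_ids (sorted_ids : List Int) : Int × List String :=
  if sorted_ids = [] then (0, [])
  else
    match PySem.List.sorted sorted_ids (fun x => x) false with
    | [] => (0, [])          -- unreachable: sorting preserves nonemptiness
    | last :: rest => (rest.foldl fmiStep (last, 0, [])).2

-- ===== PORT B =====
-- one step of B's dict-building loop over enumerate(d): key = value - index
def fmiRunStep (r : PySem.Dict Int (Int × Int)) (iv : Int × Int) : PySem.Dict Int (Int × Int) :=
  let k := iv.2 - iv.1
  match r.get? k with            -- 'if k in runs: … runs[k][0] …' (get? = none iff k not in runs)
  | some p => r.insert k (p.1, iv.2)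
  | none => r.insert k (iv.2, iv.2)

-- formatting of one complement gap between consecutive runs (_, e1) (s2, _)
def fmiBfmt (p : (Int × Int) × (Int × Int)) : String :=
  let lo := p.1.2 + 1
  let hi := p.2.1 - 1
  if lo = hi then PySem.Int.toStr lo else PySem.Int.toStr lo ++ "-" ++ PySem.Int.toStr hi

def find_missing_ids_alt (sorted_ids : List Int) : Int × List String :=
  if sorted_ids = [] then (0, [])
  else
    -- d = sorted(set(sorted_ids))
    let d := PySem.List.sorted (PySem.Set.ofList sorted_ids) (fun x => x) false
    let runs := (PySem.List.enumerate d).foldl fmiRunStep PySem.Dict.empty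
    let bounds := runs.values
    let ranges := (bounds.zip bounds.tail).map fmiBfmt
    -- d[-1] / d[0] via getLastD/headD: d is nonempty here (sorted_ids ≠ [])
    let count := (d.getLastD 0 - d.headD 0 + 1) - (d.length : Int)
    (count, ranges)

-- ===== PRECONDITION & SPEC =====
def Spec_find_missing_ids (sorted_ids : List Int) (out : Int × List String) : Prop := out = find_missing_ids_alt sorted_ids
instance (sorted_ids : List Int) (out : Int × List String) : Decidable (Spec_find_missing_ids sorted_ids out) := by unfold Spec_find_missing_ids; infer_instance

-- ===== CLAIM (what is proved, stated in full; the proofs are below) =====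
def Claim_equal_find_missing_ids : Prop := ∀ (sorted_ids : List Int), Dom_find_missing_ids sorted_ids → Spec_find_missing_ids sorted_ids (find_missing_ids sorted_ids)

-- ===== LEMMAS AND PROOFS =====

-- A's gap pairs between adjacent elements, in recursive form
def fmiGaps (last : Int) (t : List Int) : List (Int × Int) :=
  match t with
  | [] => []
  | c :: rest => (if c - last > 1 then [(last + 1, c - 1)] else []) ++ fmiGaps c rest

def fmiFmt (p : Int × Int) : String :=
  if p.1 = p.2 then PySem.Int.toStr p.1
  else PySem.Int.toStr p.1 ++ "-" ++ PySem.Int.toStr p.2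

def fmiSum (g : List (Int × Int)) : Int := g.foldl (fun acc p => acc + (p.2 - p.1 + 1)) 0

-- adjacent-duplicate removal (of a sorted list): the strictly increasing core
def fmiSd (l : Int) (t : List Int) : List Int :=
  match t with
  | [] => []
  | c :: rest => if c = l then fmiSd l rest else c :: fmiSd c rest

-- B's run list (maximal consecutive runs): current run is [s..e], remaining input t
def fmiRuns (s e : Int) (t : List Int) : List (Int × Int) :=
  match t with
  | [] => [(s, e)]
  | c :: rest => if c = e + 1 then fmiRuns s c rest else (s, e) :: fmiRuns c c rest

lemma fmiSum_shift (g : List (Int × Int)) : ∀ acc : Int,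
    g.foldl (fun acc p => acc + (p.2 - p.1 + 1)) acc = acc + fmiSum g := by
  induction g with
  | nil => intro acc; simp [fmiSum]
  | cons p rest ih =>
    intro acc
    simp only [fmiSum, List.foldl_cons] at *
    rw [ih, ih (0 + _)]; ring

-- A's loop computes (sum of gaps, formatted gaps)
lemma fmiLoop (t : List Int) : ∀ (last cnt : Int) (rngs : List String),
    (t.foldl fmiStep (last, cnt, rngs)).2
      = (cnt + fmiSum (fmiGaps last t), rngs ++ (fmiGaps last t).map fmiFmt) := by
  induction t with
  | nil => intro last cnt rngs; simp [fmiGaps, fmiSum]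
  | cons c rest ih =>
    intro last cnt rngs
    simp only [List.foldl_cons, fmiStep, fmiGaps]
    split_ifs with h1 h2
    · simp only [ih, List.singleton_append, fmiSum, List.foldl_cons, List.map_cons]
      simp only [Prod.mk.injEq]
      refine ⟨by rw [fmiSum_shift (fmiGaps c rest) (0 + (c - 1 - (last + 1) + 1))]; simp [fmiSum]; ring, ?_⟩
      have hfmt : fmiFmt (last + 1, c - 1) = PySem.Int.toStr (last + 1) := by
        simp only [fmiFmt]; rw [if_pos (by omega)]
      simp [hfmt]
    · simp only [ih, List.singleton_append, fmiSum, List.foldl_cons, List.map_cons]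
      simp only [Prod.mk.injEq]
      refine ⟨by rw [fmiSum_shift (fmiGaps c rest) (0 + (c - 1 - (last + 1) + 1))]; simp [fmiSum]; ring, ?_⟩
      have hfmt : fmiFmt (last + 1, c - 1)
          = PySem.Int.toStr (last + 1) ++ "-" ++ PySem.Int.toStr (c - 1) := by
        simp only [fmiFmt]; rw [if_neg (by omega)]
      simp [hfmt]
    · simp [ih]

-- gaps ignore adjacent duplicates (a duplicate step has diff ≤ 1 and keeps last)
lemma fmiGaps_sd (t : List Int) : ∀ l, fmiGaps l t = fmiGaps l (fmiSd l t) := by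
  induction t with
  | nil => intro l; rfl
  | cons c rest ih =>
    intro l
    by_cases h : c = l
    · subst h
      have h1 : fmiSd c (c :: rest) = fmiSd c rest := by simp [fmiSd]
      have h2 : fmiGaps c (c :: rest) = fmiGaps c rest := by
        simp only [fmiGaps]; rw [if_neg (by omega), List.nil_append]
      rw [h1, h2, ih]
    · simp only [fmiSd, if_neg h, fmiGaps, ih]

lemma mem_fmiSd (t : List Int) : ∀ l x, x ∈ fmiSd l t → x ∈ t := by
  induction t with
  | nil => intro l x h; simp [fmiSd] at h
  | cons c rest ih =>
    intro l x h
    simp only [fmiSd] at h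
    split_ifs at h with hc
    · exact List.mem_cons_of_mem _ (ih l x h)
    · rcases List.mem_cons.mp h with h | h
      · simp [h]
      · exact List.mem_cons_of_mem _ (ih c x h)

lemma mem_fmiSd_iff (t : List Int) : ∀ l x, (x ∈ l :: fmiSd l t ↔ x ∈ l :: t) := by
  induction t with
  | nil => intro l x; rfl
  | cons c rest ih =>
    intro l x
    by_cases hc : c = l
    · subst hc
      simp only [fmiSd]
      constructor
      · intro h; rcases List.mem_cons.mp ((ih c x).mp h) with h | h <;> simp [h]
      · intro h
        rcases List.mem_cons.mp h with h | h
        · simp [h]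
        · rcases List.mem_cons.mp h with h | h
          · simp [h]
          · exact (ih c x).mpr (List.mem_cons_of_mem _ h)
    · simp only [fmiSd, if_neg hc]
      constructor
      · intro h
        rcases List.mem_cons.mp h with h | h
        · simp [h]
        · exact List.mem_cons_of_mem _ ((ih c x).mp h)
      · intro h
        rcases List.mem_cons.mp h with h | h
        · simp [h]
        · exact List.mem_cons_of_mem _ ((ih c x).mpr h)

lemma pairwise_fmiSd (t : List Int) : ∀ l, (l :: t).Pairwise (· ≤ ·) →
    (l :: fmiSd l t).Pairwise (· < ·) := by
  induction t with
  | nil => intro l _; simp [fmiSd]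
  | cons c rest ih =>
    intro l hp
    rcases List.pairwise_cons.mp hp with ⟨hle, hp'⟩
    by_cases hc : c = l
    · subst hc
      simp only [fmiSd]
      exact ih c hp'
    · have hlc : l < c := lt_of_le_of_ne (hle c (by simp)) (fun h => hc h.symm)
      simp only [fmiSd, if_neg hc]
      have hrec := ih c hp'
      refine List.pairwise_cons.mpr ⟨?_, hrec⟩
      intro x hx
      rcases List.mem_cons.mp hx with h | h
      · omega
      · have hxr : x ∈ rest := mem_fmiSd rest c x h
        have := (List.pairwise_cons.mp hp').1 x hxr
        omega

-- the strictly increasing core of the sorted list IS sorted(set(xs))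
lemma sd_eq_sorted_set (xs : List Int) (last : Int) (rest : List Int)
    (hs : PySem.List.sorted xs (fun x => x) false = last :: rest) :
    PySem.List.sorted (PySem.Set.ofList xs) (fun x => x) false = last :: fmiSd last rest := by
  have hperm : (PySem.List.sorted xs (fun x => x) false).Perm xs := PySem.List.sorted_perm _ _ _
  have hpw : (PySem.List.sorted xs (fun x => x) false).Pairwise (fun a b => a ≤ b) :=
    PySem.List.sorted_pairwise xs (fun x => x)
  rw [hs] at hperm hpw
  have hlt : (last :: fmiSd last rest).Pairwise (· < ·) := pairwise_fmiSd rest last hpw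
  have hnd : (last :: fmiSd last rest).Nodup := hlt.imp (fun h => ne_of_lt h)
  have hndS : (PySem.Set.ofList xs).Nodup := PySem.Set.nodup_ofList xs
  have hmem : ∀ x, x ∈ last :: fmiSd last rest ↔ x ∈ PySem.Set.ofList xs := by
    intro x
    rw [mem_fmiSd_iff rest last x, PySem.Set.mem_ofList]
    exact ⟨fun h => hperm.mem_iff.mp h, fun h => hperm.mem_iff.mpr h⟩
  have hpermS : (last :: fmiSd last rest).Perm (PySem.Set.ofList xs) :=
    (List.perm_ext_iff_of_nodup hnd hndS).mpr hmem
  exact PySem.List.sorted_eq_of_perm_of_pairwise_lt (PySem.Set.ofList xs) (last :: fmiSd last rest) (fun x => x) hpermS hlt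

-- count identity on a strictly increasing list
lemma fmiCount (t : List Int) : ∀ a, (a :: t).Pairwise (· < ·) →
    fmiSum (fmiGaps a t) = (a :: t).getLast (by simp) - a + 1 - (1 + (t.length : Int)) := by
  induction t with
  | nil => intro a _; simp [fmiGaps, fmiSum]
  | cons c rest ih =>
    intro a hp
    rcases List.pairwise_cons.mp hp with ⟨hlt, hp'⟩
    have hac : a < c := hlt c (by simp)
    have hrec := ih c hp'
    have hlast : (a :: c :: rest).getLast (by simp) = (c :: rest).getLast (by simp) := by
      simp [List.getLast_cons]
    simp only [fmiGaps]
    rw [hlast]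
    by_cases h : c - a > 1
    · simp only [if_pos h, List.singleton_append, fmiSum, List.foldl_cons]
      rw [fmiSum_shift (fmiGaps c rest) (0 + (c - 1 - (a + 1) + 1))]
      have := hrec
      simp only [fmiSum] at this ⊢
      rw [this]
      simp [List.length_cons]
      ring
    · have hca : c = a + 1 := by omega
      simp only [if_neg h, List.nil_append]
      rw [hrec]
      simp [List.length_cons]
      omega

-- formatting: complements between consecutive runs = formatted gaps
lemma fmiRuns_head (t : List Int) : ∀ s e, ∃ y rest, fmiRuns s e t = (s, y) :: rest := by
  induction t with
  | nil => intro s e; exact ⟨e, [], rfl⟩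
  | cons c r ih =>
    intro s e
    simp only [fmiRuns]
    by_cases h : c = e + 1
    · rw [if_pos h]; exact ih s c
    · rw [if_neg h]; exact ⟨e, _, rfl⟩

lemma fmiZipRuns (t : List Int) : ∀ s e, (e :: t).Pairwise (· < ·) →
    ((fmiRuns s e t).zip (fmiRuns s e t).tail).map fmiBfmt = (fmiGaps e t).map fmiFmt := by
  induction t with
  | nil => intro s e _; simp [fmiRuns, fmiGaps]
  | cons c rest ih =>
    intro s e hp
    rcases List.pairwise_cons.mp hp with ⟨hlt, hp'⟩
    have hec : e < c := hlt c (by simp)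
    simp only [fmiRuns, fmiGaps]
    by_cases h : c = e + 1
    · rw [if_pos h, if_neg (by omega), List.nil_append]
      exact ih s c hp'
    · rw [if_neg h, if_pos (by omega), List.singleton_append]
      obtain ⟨y, r', hr⟩ := fmiRuns_head rest c c
      rw [hr]
      simp only [List.zip_cons_cons, List.tail_cons, List.map_cons]
      have hfmt : fmiBfmt ((s, e), (c, y)) = fmiFmt (e + 1, c - 1) := rfl
      rw [hfmt]
      have htl := ih c c hp'
      rw [hr] at htl
      simp only [List.tail_cons] at htl
      rw [htl]

-- dict lookup on an explicit items list whose keys before the last entry miss k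
lemma fmiGet_none (l : List (Int × (Int × Int))) (k : Int)
    (h : ∀ p ∈ l, p.1 ≠ k) : (PySem.Dict.mk l).get? k = none := by
  induction l with
  | nil => rfl
  | cons p rest ih =>
    rw [PySem.Dict.get?_mk_cons]
    have hp : p.1 ≠ k := h p (by simp)
    rw [if_neg (by simpa using hp)]
    exact ih (fun q hq => h q (by simp [hq]))

lemma fmiGet_last (base : List (Int × (Int × Int))) (k : Int) (v : Int × Int)
    (h : ∀ p ∈ base, p.1 ≠ k) : (PySem.Dict.mk (base ++ [(k, v)])).get? k = some v := by
  induction base with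
  | nil => simp [PySem.Dict.get?_mk_cons]
  | cons p rest ih =>
    rw [List.cons_append, PySem.Dict.get?_mk_cons]
    have hp : p.1 ≠ k := h p (by simp)
    rw [if_neg (by simpa using hp)]
    exact ih (fun q hq => h q (by simp [hq]))

lemma fmiMap_overwrite (base : List (Int × (Int × Int))) (k : Int) (v w : Int × Int)
    (h : ∀ p ∈ base, p.1 ≠ k) :
    (base ++ [(k, v)]).map (fun p => if p.1 == k then (k, w) else p) = base ++ [(k, w)] := by
  induction base with
  | nil => simp
  | cons p rest ih =>
    have hp : p.1 ≠ k := h p (by simp)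
    simp only [List.cons_append, List.map_cons]
    rw [if_neg (by simpa using hp), ih (fun q hq => h q (by simp [hq]))]

-- the dict loop invariant: processing t from index j+1 with current run [s..e] (e at index j)
lemma fmiRunsFold (t : List Int) : ∀ (j : Int) (base : List (Int × (Int × Int))) (s e : Int),
    (e :: t).Pairwise (· < ·) →
    (∀ p ∈ base, p.1 < e - j) →
    ((PySem.List.enumerate t (j + 1)).foldl fmiRunStep
        (PySem.Dict.mk (base ++ [(e - j, (s, e))]))).values
      = base.map (·.2) ++ fmiRuns s e t := by
  induction t with
  | nil =>
    intro j base s e _ _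
    simp [PySem.List.enumerate_nil, PySem.Dict.values, fmiRuns]
  | cons c rest ih =>
    intro j base s e hp hbase
    rcases List.pairwise_cons.mp hp with ⟨hlt, hp'⟩
    have hec : e < c := hlt c (by simp)
    rw [PySem.List.enumerate_cons, List.foldl_cons]
    have hbne : ∀ p ∈ base, p.1 ≠ e - j := fun p hp => ne_of_lt (hbase p hp)
    by_cases h : c = e + 1
    · -- same key: overwrite the last entry in place
      have hk : c - (j + 1) = e - j := by omega
      have hget : (PySem.Dict.mk (base ++ [(e - j, (s, e))])).get? (c - (j + 1)) = some (s, e) := by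
        rw [hk]; exact fmiGet_last base _ _ hbne
      have hcont : (PySem.Dict.mk (base ++ [(e - j, (s, e))])).contains (c - (j + 1)) = true := by
        rw [PySem.Dict.contains_eq_isSome_get?, hget]; rfl
      have hstep : fmiRunStep (PySem.Dict.mk (base ++ [(e - j, (s, e))])) (j + 1, c)
          = PySem.Dict.mk (base ++ [(c - (j + 1), (s, c))]) := by
        simp only [fmiRunStep, hget]
        apply PySem.Dict.ext
        rw [PySem.Dict.items_insert_of_contains _ _ hcont]
        show (base ++ [(e - j, (s, e))]).map _ = _
        rw [hk]
        exact fmiMap_overwrite base _ _ _ hbne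
      rw [hstep]
      have := ih (j + 1) base s c (by
          refine List.pairwise_cons.mpr ⟨?_, (List.pairwise_cons.mp hp').2⟩
          intro x hx
          have := (List.pairwise_cons.mp hp').1 x hx
          omega
        ) (by intro p hp0; have := hbase p hp0; omega)
      rw [this]
      simp only [fmiRuns, if_pos h]
    · -- fresh key: append a new run
      have hknew : e - j < c - (j + 1) := by omega
      have hget : (PySem.Dict.mk (base ++ [(e - j, (s, e))])).get? (c - (j + 1)) = none := by
        apply fmiGet_none
        intro p hp0
        rcases List.mem_append.mp hp0 with h0 | h0
        · have := hbase p h0; omega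
        · simp only [List.mem_singleton] at h0
          subst h0
          show e - j ≠ c - (j + 1)
          omega
      have hcont : (PySem.Dict.mk (base ++ [(e - j, (s, e))])).contains (c - (j + 1)) = false := by
        rw [PySem.Dict.contains_eq_isSome_get?, hget]; rfl
      have hstep : fmiRunStep (PySem.Dict.mk (base ++ [(e - j, (s, e))])) (j + 1, c)
          = PySem.Dict.mk ((base ++ [(e - j, (s, e))]) ++ [(c - (j + 1), (c, c))]) := by
        simp only [fmiRunStep, hget]
        apply PySem.Dict.ext
        rw [PySem.Dict.items_insert_of_not_contains _ _ hcont]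
      rw [hstep]
      have := ih (j + 1) (base ++ [(e - j, (s, e))]) c c (List.pairwise_cons.mp hp).2 (by
          intro p hp0
          rcases List.mem_append.mp hp0 with h0 | h0
          · have := hbase p h0; omega
          · simp only [List.mem_singleton] at h0
            subst h0
            show e - j < c - (j + 1)
            omega)
      rw [this]
      simp [fmiRuns, if_neg h]

-- entry into the invariant: the whole dict loop on a strictly increasing a :: t
lemma fmiRunsFold_start (a : Int) (t : List Int) (hp : (a :: t).Pairwise (· < ·)) :
    ((PySem.List.enumerate (a :: t)).foldl fmiRunStep PySem.Dict.empty).values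
      = fmiRuns a a t := by
  rw [show PySem.List.enumerate (a :: t) = PySem.List.enumerate (a :: t) 0 from rfl]
  rw [PySem.List.enumerate_cons, List.foldl_cons]
  have hstep : fmiRunStep PySem.Dict.empty (0, a) = PySem.Dict.mk ([] ++ [(a - 0, (a, a))]) := by
    simp only [fmiRunStep, PySem.Dict.get?_empty]
    apply PySem.Dict.ext
    rw [PySem.Dict.items_insert_of_not_contains _ _ (PySem.Dict.contains_empty _)]
    simp [PySem.Dict.empty]
  rw [hstep]
  have := fmiRunsFold t 0 [] a a (by simpa using hp) (by simp)
  simpa using this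

-- ===== VERDICT (by name: the statement is the Claim_ definition above) =====
theorem find_missing_ids_spec : Claim_equal_find_missing_ids := by
  intro xs _
  unfold Spec_find_missing_ids find_missing_ids find_missing_ids_alt
  by_cases hnil : xs = []
  · subst hnil; rfl
  · rw [if_neg hnil, if_neg hnil]
    cases hs : PySem.List.sorted xs (fun x => x) false with
    | nil =>
      exact absurd ((PySem.List.sorted_eq_nil_iff xs (fun x => x) false).mp hs) hnil
    | cons last rest =>
      have hD := sd_eq_sorted_set xs last rest hs
      have hpw : (last :: rest).Pairwise (fun a b => a ≤ b) := by
        have := PySem.List.sorted_pairwise xs (fun x => x)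
        rwa [hs] at this
      have hlt : (last :: fmiSd last rest).Pairwise (· < ·) := pairwise_fmiSd rest last hpw
      change (rest.foldl fmiStep (last, 0, [])).2
        = ((PySem.List.sorted (PySem.Set.ofList xs) (fun x => x) false).getLastD 0
             - (PySem.List.sorted (PySem.Set.ofList xs) (fun x => x) false).headD 0 + 1
             - ((PySem.List.sorted (PySem.Set.ofList xs) (fun x => x) false).length : Int),
           (((((PySem.List.enumerate (PySem.List.sorted (PySem.Set.ofList xs) (fun x => x) false)).foldl
                  fmiRunStep PySem.Dict.empty).values).zip
              ((((PySem.List.enumerate (PySem.List.sorted (PySem.Set.ofList xs) (fun x => x) false)).foldl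
                  fmiRunStep PySem.Dict.empty).values).tail)).map fmiBfmt))
      rw [fmiLoop, fmiGaps_sd rest last, hD,
          fmiRunsFold_start last (fmiSd last rest) hlt]
      refine Prod.ext ?_ ?_
      · -- counts
        show 0 + fmiSum (fmiGaps last (fmiSd last rest)) = _
        rw [zero_add, fmiCount (fmiSd last rest) last hlt]
        have hhead : (last :: fmiSd last rest).headD 0 = last := rfl
        have hlast : (last :: fmiSd last rest).getLastD 0
            = (last :: fmiSd last rest).getLast (by simp) := by
          simp [List.getLastD_eq_getLast?, List.getLast?_eq_some_getLast]
        simp only [hhead, hlast, List.length_cons]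
        push_cast
        ring
      · -- ranges
        show [] ++ (fmiGaps last (fmiSd last rest)).map fmiFmt = _
        rw [List.nil_append, ← fmiZipRuns (fmiSd last rest) last last hlt]
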